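-- pv_equiv track=rewrite | github.com/stasonspb/checkio | find-sequence.py | check
-- ===== SOURCE A (Python) =====
-- def check(list):
--     x = [i for i in list if len(i) >= 4]
--     for i in x:
--         while len(i) >= 4:
--             if i[0] == i[1] == i[2] == i[3]:
--                 return True
--                 break
--             else:
--                 i.pop(0)
--     return False
-- ===== SOURCE B (Python) =====
-- def check(list):
--     for row in list:
--         prev = None
--         run = 0
--         for x in row:
--             if prev == x:
--                 run += 1
--             else:
--                 prev = x
--                 run = 1
--             if run >= 4:
--                 return True
--     return False
-- ===== Notes on version B (the rewrite author's own statement) =====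
-- stated objective: alternative
-- what changed: Replaces the per-row while-loop that repeatedly pops the head of the row with a single pass per row maintaining the current run length of consecutive equal elements; B also does not mutate the input rows.
import Mathlib
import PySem

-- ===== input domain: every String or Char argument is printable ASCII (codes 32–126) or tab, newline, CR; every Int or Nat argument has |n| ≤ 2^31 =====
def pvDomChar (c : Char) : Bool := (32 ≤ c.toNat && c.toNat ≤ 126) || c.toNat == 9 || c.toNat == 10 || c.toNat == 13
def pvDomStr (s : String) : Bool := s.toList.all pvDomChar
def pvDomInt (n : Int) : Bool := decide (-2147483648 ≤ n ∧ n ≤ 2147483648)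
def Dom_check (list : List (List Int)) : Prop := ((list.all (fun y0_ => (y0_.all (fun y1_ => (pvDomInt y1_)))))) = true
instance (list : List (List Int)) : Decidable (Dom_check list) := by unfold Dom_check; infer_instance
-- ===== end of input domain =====

-- B replaces A's per-row head-popping while-loop by a single pass counting the current
-- run of consecutive equal elements (an alternative, single-pass algorithm).
-- Note: A mutates its argument's rows in place via pop(0); the equivalence proved here is
-- about the return value only (B does not mutate).


-- ===== PORT A =====
-- the inner `while len(i) >= 4: if i[0]==i[1]==i[2]==i[3]: return True else: i.pop(0)`
def checkRow : List Int → Bool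
  | a :: b :: c :: d :: rest =>
      if a = b ∧ b = c ∧ c = d then true else checkRow (b :: c :: d :: rest)
  | _ => false
termination_by l => l.length
decreasing_by simp

def check (list : List (List Int)) : Bool :=
  let x := list.filter (fun i => decide (4 ≤ i.length))
  x.any checkRow

-- ===== PORT B =====
-- the inner `for x in row:` loop carrying (prev, run)
def rowRun : Option Int → Int → List Int → Bool
  | _, _, [] => false
  | prev, run, x :: xs =>
      let run' := if prev = some x then run + 1 else 1
      if 4 ≤ run' then true else rowRun (some x) run' xs

def check_alt (list : List (List Int)) : Bool :=
  list.any (fun row => rowRun none 0 row)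

-- ===== PRECONDITION & SPEC =====
def Spec_check (list : List (List Int)) (out : Bool) : Prop := out = check_alt list
instance (list : List (List Int)) (out : Bool) : Decidable (Spec_check list out) := by unfold Spec_check; infer_instance

-- ===== CLAIM (what is proved, stated in full; the proofs are below) =====
def Claim_equal_check : Prop := ∀ (list : List (List Int)), Dom_check list → Spec_check list (check list)

-- ===== LEMMAS AND PROOFS =====

-- popping the head of a block of ≤3 equal elements that is followed by a different one
lemma checkRow_drop (r : Nat) (hr : r ≤ 3) (p x : Int) (xs : List Int) (hpx : p ≠ x) :
    checkRow (List.replicate r p ++ x :: xs) = checkRow (x :: xs) := by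
  interval_cases r <;> rcases xs with _ | ⟨a, _ | ⟨b, xs⟩⟩ <;> simp [checkRow, hpx]

lemma checkRow_short (row : List Int) (h : row.length < 4) : checkRow row = false := by
  rcases row with _ | ⟨a, _ | ⟨b, _ | ⟨c, _ | ⟨d, rest⟩⟩⟩⟩ <;> simp_all [checkRow] ; omega

-- main loop invariant: a run of `run` copies of `p` has been seen just before `xs`
lemma rowRun_eq (xs : List Int) : ∀ (p run : Int), 1 ≤ run → run ≤ 3 →
    rowRun (some p) run xs = checkRow (List.replicate run.toNat p ++ xs) := by
  induction xs with
  | nil =>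
    intro p run h1 h3
    rw [checkRow_short]
    · simp [rowRun]
    · simp; omega
  | cons x xs ih =>
    intro p run h1 h3
    by_cases hpx : p = x
    · subst hpx
      by_cases h4 : run = 3
      · subst h4
        have hl : rowRun (some p) 3 (p :: xs) = true := by simp [rowRun]
        rw [hl, show ((3:Int).toNat = 3) from rfl]
        simp [checkRow, List.replicate]
      · have hstep : rowRun (some p) run (p :: xs) = rowRun (some p) (run + 1) xs := by
          simp [rowRun]; omega
        have hrun' : (run + 1).toNat = run.toNat + 1 := by omega
        rw [hstep, ih p (run + 1) (by omega) (by omega), hrun']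
        congr 1
        rw [List.replicate_succ', List.append_assoc]
        rfl
    · have hstep : rowRun (some p) run (x :: xs) = rowRun (some x) 1 xs := by
        simp [rowRun, hpx]
      rw [hstep, ih x 1 (by omega) (by omega),
        checkRow_drop run.toNat (by omega) p x xs hpx]
      rfl

lemma row_eq (row : List Int) : checkRow row = rowRun none 0 row := by
  cases row with
  | nil => simp [checkRow, rowRun]
  | cons x xs =>
    have hstep : rowRun none 0 (x :: xs) = rowRun (some x) 1 xs := by simp [rowRun]
    rw [hstep, rowRun_eq xs x 1 (by omega) (by omega)]
    rfl

lemma row_full_eq :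
    (fun row : List Int => decide (4 ≤ row.length) && checkRow row)
      = (fun row : List Int => rowRun none 0 row) := by
  funext row
  rw [← row_eq row]
  by_cases h : 4 ≤ row.length
  · simp [h]
  · simp [checkRow_short row (by omega)]

-- ===== VERDICT (by name: the statement is the Claim_ definition above) =====
theorem check_spec : Claim_equal_check := by
  intro list _
  unfold Spec_check check check_alt
  simp only [List.any_filter]
  rw [row_full_eq]
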